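-- pv_equiv track=rewrite | github.com/LucileVG/GLASS | src/.ipynb_checkpoints/bio_basics-checkpoint.py | reverse_aln
-- ===== SOURCE A (Python) =====
-- def reverse_aln(dna_seq: str, aln_aa_seq: str) -> str:
--     """Reverse-align a DNA sequence from an aligned AA sequence.
--
--     Parameters
--     ----------
--     dna_seq : str
--         Raw DNA sequence
--     aln_aa_seq : str
--         Aligned AA sequence
--
--     Returns
--     -------
--     str
--         Aligned DNA sequence
--     """
--     start_gap = len(aln_aa_seq) - len(
--         aln_aa_seq.lstrip("-")
--     )  # Number of gaps at the beginning of the aligned protein sequence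
--     end_gap = len(aln_aa_seq) - len(
--         aln_aa_seq.rstrip("-")
--     )  # Number of gaps at the end of the aligned protein sequence
--     aln_aa_seq = aln_aa_seq.lstrip("-").rstrip(
--         "-"
--     )  # We remove starting and ending gaps
--     values = [len(AA) * 3 for AA in aln_aa_seq.split("-")]
--     # Each element of the list is the number of aminoacids
--     # between two consecutive gaps (can be 0 if there are
--     # several gaps one after the other) multiplied by 3
--     # in order to have the number of nucleotides
--     aln_dna_seq = (
--         "---" * start_gap
--     )  # Start the aligned nucleotidic sequence
--     count = 0
--     for bps in values:  # Loop to add nucleotides and gaps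
--         aln_dna_seq = aln_dna_seq + dna_seq[count : count + bps] + "---"
--         count += bps
--     return (
--         aln_dna_seq.rstrip("---") + "---" * end_gap
--     )  # Add the ending gaps
-- ===== SOURCE B (Python) =====
-- def reverse_aln(dna_seq: str, aln_aa_seq: str) -> str:
--     """Reverse-align a DNA sequence from an aligned AA sequence.
--
--     Single per-character pass: walk the aligned AA sequence with its
--     trailing gaps removed, emitting "---" per gap and the next codon per
--     amino acid, then strip trailing dashes and re-append the end gaps.
--     """
--     core = aln_aa_seq.rstrip("-")
--     end_gap = len(aln_aa_seq) - len(core)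
--     parts = []
--     count = 0
--     for ch in core:
--         if ch == "-":
--             parts.append("---")
--         else:
--             parts.append(dna_seq[count:count + 3])
--             count += 3
--     return "".join(parts).rstrip("-") + "---" * end_gap
-- ===== Notes on version B (the rewrite author's own statement) =====
-- stated objective: idiomatic
-- what changed: Replaces the split('-')/segment-length precomputation and the per-segment string-concatenation loop by a single per-character pass over the rstrip'd aligned AA sequence that emits '---' per gap and the next codon per residue, collecting pieces in a list joined once at the end.
import Mathlib
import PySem

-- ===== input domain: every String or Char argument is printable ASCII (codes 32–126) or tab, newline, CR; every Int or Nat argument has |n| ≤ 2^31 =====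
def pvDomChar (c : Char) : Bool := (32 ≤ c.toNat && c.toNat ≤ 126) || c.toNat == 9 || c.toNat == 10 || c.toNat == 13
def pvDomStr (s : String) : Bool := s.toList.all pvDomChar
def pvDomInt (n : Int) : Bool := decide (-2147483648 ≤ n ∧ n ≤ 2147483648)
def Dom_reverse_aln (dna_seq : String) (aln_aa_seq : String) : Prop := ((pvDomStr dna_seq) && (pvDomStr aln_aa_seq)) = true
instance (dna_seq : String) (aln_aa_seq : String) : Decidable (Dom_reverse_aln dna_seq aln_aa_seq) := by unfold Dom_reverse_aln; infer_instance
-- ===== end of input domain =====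

-- B builds the aligned DNA with a single per-character pass (gap → "---", residue → next codon)
-- joined once at the end, instead of A's split("-")/segment-length list and per-segment loop; idiomatic, same cost.

-- shared helpers: Python's s.lstrip("-") / s.rstrip("-") on code points.  PySem has only
-- whitespace strip and the two-sided stripChars, so these are ported by hand; they are exact:
-- for the single-character set "-" Python drops leading (resp. trailing) '-' characters.
def pvLstripDash (s : List Char) : List Char := s.dropWhile (· == '-')
def pvRstripDash (s : List Char) : List Char := (s.reverse.dropWhile (· == '-')).reverse
-- "---" * k
def pvDashes (k : Nat) : List Char := (List.replicate k ['-', '-', '-']).flatten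

-- ===== PORT A =====
-- loop body of A: aln_dna_seq = aln_dna_seq + dna_seq[count:count+bps] + "---"; count += bps
def pvStepA (dl : List Char) (st : List Char × Nat) (bps : Nat) : List Char × Nat :=
  (st.1 ++ PySem.List.slice dl (some (st.2 : Int)) (some ((st.2 : Int) + (bps : Int))) ++ ['-', '-', '-'], st.2 + bps)

def reverse_aln (dna_seq : String) (aln_aa_seq : String) : String :=
  let aa := aln_aa_seq.toList
  let start_gap := aa.length - (pvLstripDash aa).length
  let end_gap := aa.length - (pvRstripDash aa).length
  let core := pvRstripDash (pvLstripDash aa)                  -- aln_aa_seq.lstrip("-").rstrip("-")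
  let values := (PySem.Chars.splitOn core ['-']).map (fun AA => AA.length * 3)
  let st := values.foldl (pvStepA dna_seq.toList) (pvDashes start_gap, 0)
  String.mk (pvRstripDash st.1 ++ pvDashes end_gap)           -- .rstrip("---") strips the char set {'-'}

-- ===== PORT B =====
-- loop body of B: '-' → parts.append("---"); else parts.append(dna_seq[count:count+3]); count += 3
def pvStepB (dl : List Char) (st : List (List Char) × Nat) (ch : Char) : List (List Char) × Nat :=
  if ch == '-' then (st.1 ++ [['-', '-', '-']], st.2)
  else (st.1 ++ [PySem.List.slice dl (some (st.2 : Int)) (some ((st.2 : Int) + 3))], st.2 + 3)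

def reverse_aln_alt (dna_seq : String) (aln_aa_seq : String) : String :=
  let core := pvRstripDash aln_aa_seq.toList                  -- aln_aa_seq.rstrip("-")
  let end_gap := aln_aa_seq.toList.length - core.length
  let st := core.foldl (pvStepB dna_seq.toList) ([], 0)
  String.mk (pvRstripDash (PySem.Chars.join [] st.1) ++ pvDashes end_gap)

-- ===== PRECONDITION & SPEC =====
def Spec_reverse_aln (dna_seq : String) (aln_aa_seq : String) (out : String) : Prop := out = reverse_aln_alt dna_seq aln_aa_seq
instance (dna_seq : String) (aln_aa_seq : String) (out : String) : Decidable (Spec_reverse_aln dna_seq aln_aa_seq out) := by unfold Spec_reverse_aln; infer_instance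

-- ===== CLAIM (what is proved, stated in full; the proofs are below) =====
def Claim_equal_reverse_aln : Prop := ∀ (dna_seq : String) (aln_aa_seq : String), Dom_reverse_aln dna_seq aln_aa_seq → Spec_reverse_aln dna_seq aln_aa_seq (reverse_aln dna_seq aln_aa_seq)

-- ===== LEMMAS AND PROOFS =====

-- recursive characterisation of Python's split("-")
def pvSplitD : List Char → List (List Char)
  | [] => [[]]
  | c :: t => if c = '-' then [] :: pvSplitD t else (pvSplitD t).modifyHead (c :: ·)

theorem pvSplitD_ne_nil (l : List Char) : pvSplitD l ≠ [] := by
  cases l with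
  | nil => simp [pvSplitD]
  | cons c t =>
    simp only [pvSplitD]
    split_ifs
    · simp
    · have := pvSplitD_ne_nil t
      cases h : pvSplitD t with
      | nil => exact absurd h this
      | cons a b => simp

theorem pvSplitOn_go_nil (fuel : Nat) (cur : List Char) (acc : List (List Char)) :
    PySem.Chars.splitOn.go ['-'] (fuel + 1) [] cur acc = (cur.reverse :: acc).reverse := by
  simp [PySem.Chars.splitOn.go]

theorem pvSplitOn_go_dash (fuel : Nat) (t cur : List Char) (acc : List (List Char)) :
    PySem.Chars.splitOn.go ['-'] (fuel + 1) ('-' :: t) cur acc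
      = PySem.Chars.splitOn.go ['-'] fuel t [] (cur.reverse :: acc) := by
  simp [PySem.Chars.splitOn.go, List.isPrefixOf]

theorem pvSplitOn_go_cons (fuel : Nat) (c : Char) (hc : ¬ c = '-') (t cur : List Char)
    (acc : List (List Char)) :
    PySem.Chars.splitOn.go ['-'] (fuel + 1) (c :: t) cur acc
      = PySem.Chars.splitOn.go ['-'] fuel t (c :: cur) acc := by
  simp [PySem.Chars.splitOn.go, List.isPrefixOf]
  intro h; exact absurd h.symm hc

theorem pvSplitOn_go_eq (l : List Char) : ∀ (fuel : Nat) (cur : List Char) (acc : List (List Char)),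
    l.length < fuel →
    PySem.Chars.splitOn.go ['-'] fuel l cur acc
      = acc.reverse ++ (pvSplitD l).modifyHead (cur.reverse ++ ·) := by
  induction l with
  | nil =>
    intro fuel cur acc h
    obtain ⟨f, rfl⟩ : ∃ f, fuel = f + 1 := ⟨fuel - 1, by omega⟩
    simp [pvSplitOn_go_nil, pvSplitD]
  | cons c t ih =>
    intro fuel cur acc h
    obtain ⟨f, rfl⟩ : ∃ f, fuel = f + 1 := ⟨fuel - 1, by omega⟩
    by_cases hc : c = '-'
    · subst hc
      rw [pvSplitOn_go_dash, ih f [] (cur.reverse :: acc) (by simpa using h)]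
      simp only [pvSplitD, List.reverse_cons, List.reverse_nil, List.nil_append]
      cases hsp : pvSplitD t <;> simp
    · rw [pvSplitOn_go_cons f c hc, ih f (c :: cur) acc (by simpa using h)]
      simp only [pvSplitD, if_neg hc, List.modifyHead_modifyHead]
      congr 1
      cases hsp : pvSplitD t with
      | nil => exact absurd hsp (pvSplitD_ne_nil t)
      | cons a b => simp

theorem pvSplitOn_dash (l : List Char) : PySem.Chars.splitOn l ['-'] = pvSplitD l := by
  rw [PySem.Chars.splitOn, pvSplitOn_go_eq l (l.length + 1) [] [] (by omega)]
  cases h : pvSplitD l with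
  | nil => exact absurd h (pvSplitD_ne_nil l)
  | cons a b => simp

-- A's loop, accumulator-free
def pvFA (dl : List Char) : Nat → List Nat → List Char
  | _, [] => []
  | c, b :: bs => (dl.drop c).take b ++ ['-', '-', '-'] ++ pvFA dl (c + b) bs

-- B's loop, accumulator-free (the list of appended parts)
def pvPB (dl : List Char) : Nat → List Char → List (List Char)
  | _, [] => []
  | c, ch :: t => if ch = '-' then ['-', '-', '-'] :: pvPB dl c t
                  else (dl.drop c).take 3 :: pvPB dl (c + 3) t

theorem pvFoldA (dl : List Char) (vs : List Nat) : ∀ (acc : List Char) (c : Nat),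
    (vs.foldl (pvStepA dl) (acc, c)).1 = acc ++ pvFA dl c vs := by
  induction vs with
  | nil => intro acc c; simp [pvFA]
  | cons b bs ih =>
    intro acc c
    simp only [List.foldl_cons, pvStepA, pvFA]
    rw [ih]
    rw [show ((c : Int) + (b : Int)) = (((c + b : Nat) : Int)) by push_cast; ring]
    rw [PySem.List.slice_natCast dl c (c + b)]
    simp

theorem pvFoldB (dl : List Char) (core : List Char) : ∀ (ps : List (List Char)) (c : Nat),
    (core.foldl (pvStepB dl) (ps, c)).1 = ps ++ pvPB dl c core := by
  induction core with
  | nil => intro ps c; simp [pvPB]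
  | cons ch t ih =>
    intro ps c
    simp only [List.foldl_cons, pvStepB, pvPB]
    by_cases hc : ch = '-'
    · simp only [if_pos hc, if_pos (by simp [hc] : (ch == '-') = true)]
      rw [ih]; simp
    · simp only [if_neg hc, if_neg (by simp [hc] : ¬ (ch == '-') = true)]
      rw [ih]
      rw [show ((c : Int) + 3) = (((c + 3 : Nat) : Int)) by push_cast; ring]
      rw [PySem.List.slice_natCast dl c (c + 3)]
      simp

theorem pvJoin_nil_flatten (ps : List (List Char)) : PySem.Chars.join [] ps = ps.flatten := by
  induction ps with
  | nil => simp [PySem.Chars.join, List.intercalate]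
  | cons h t ih =>
    cases t with
    | nil => simp [PySem.Chars.join, List.intercalate]
    | cons h2 t2 =>
      simp only [PySem.Chars.join, List.intercalate] at *
      simp [List.intersperse] at *
      simpa using ih

-- the key step: A's per-segment loop = B's per-character loop plus one trailing "---"
theorem pvMain (dl : List Char) (core : List Char) : ∀ (c : Nat),
    pvFA dl c ((pvSplitD core).map (fun AA => AA.length * 3))
      = (pvPB dl c core).flatten ++ ['-', '-', '-'] := by
  induction core with
  | nil => intro c; simp [pvSplitD, pvFA, pvPB]
  | cons ch t ih =>
    intro c
    by_cases hc : ch = '-'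
    · subst hc
      simp only [pvSplitD]
      simp [pvFA, pvPB, ih c]
    · obtain ⟨h, hs, hsp⟩ : ∃ a b, pvSplitD t = a :: b := by
        cases hsp : pvSplitD t with
        | nil => exact absurd hsp (pvSplitD_ne_nil t)
        | cons a b => exact ⟨a, b, rfl⟩
      simp only [pvSplitD, if_neg hc, hsp, List.modifyHead_cons, List.map_cons, pvFA, pvPB]
      have ihc := ih (c + 3)
      rw [hsp] at ihc
      simp only [List.map_cons, pvFA] at ihc
      have harith : (ch :: h).length * 3 = 3 + h.length * 3 := by simp [List.length_cons]; ring
      rw [harith, List.take_add]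
      rw [show c + (3 + h.length * 3) = c + 3 + h.length * 3 by omega]
      rw [List.drop_drop]
      rw [show c + 3 = 3 + c from Nat.add_comm c 3] at *
      simp only [List.flatten_cons, List.append_assoc] at ihc ⊢
      rw [← ihc]

theorem pvRstrip_append_dash3 (x : List Char) :
    pvRstripDash (x ++ ['-', '-', '-']) = pvRstripDash x := by
  simp [pvRstripDash, List.dropWhile]

theorem pvRstrip_append (u v : List Char) (h : v.reverse.dropWhile (· == '-') ≠ []) :
    pvRstripDash (u ++ v) = u ++ pvRstripDash v := by
  simp only [pvRstripDash, List.reverse_append, List.dropWhile_append]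
  rw [if_neg (by simpa using h)]
  simp

theorem pvRstrip_all_dash (l : List Char) (h : ∀ c ∈ l, c = '-') : pvRstripDash l = [] := by
  simp only [pvRstripDash, List.reverse_eq_nil_iff]
  rw [List.dropWhile_eq_nil_iff]
  intro c hc
  simp [h c (List.mem_reverse.mp hc)]

theorem pvDashes_all_dash (k : Nat) : ∀ c ∈ pvDashes k, c = '-' := by
  intro c hc
  simp only [pvDashes, List.mem_flatten] at hc
  obtain ⟨l, hl, hcl⟩ := hc
  rw [List.eq_of_mem_replicate hl] at hcl
  simp at hcl; exact hcl

theorem pvPB_dash_prefix (dl : List Char) (k : Nat) (t : List Char) (c : Nat) :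
    pvPB dl c (List.replicate k '-' ++ t) = List.replicate k ['-', '-', '-'] ++ pvPB dl c t := by
  induction k with
  | zero => simp
  | succ n ihn => simp [List.replicate_succ, pvPB, ihn]

-- ===== VERDICT (by name: the statement is the Claim_ definition above) =====
theorem pvLstrip_decomp (aa : List Char) :
    aa = List.replicate (aa.length - (pvLstripDash aa).length) '-' ++ pvLstripDash aa := by
  have h1 : aa.takeWhile (· == '-') ++ pvLstripDash aa = aa := List.takeWhile_append_dropWhile
  have h2 : aa.takeWhile (· == '-') = List.replicate (aa.takeWhile (· == '-')).length '-' := by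
    apply List.eq_replicate_of_mem
    intro c hc
    have := List.mem_takeWhile_imp hc
    simpa using this
  have h3 : (aa.takeWhile (· == '-')).length = aa.length - (pvLstripDash aa).length := by
    have := congrArg List.length h1
    simp only [List.length_append] at this
    omega
  conv_lhs => rw [← h1]
  rw [h2, h3]

theorem reverse_aln_spec : Claim_equal_reverse_aln := by
  intro dna aln _
  unfold Spec_reverse_aln reverse_aln reverse_aln_alt
  simp only [pvSplitOn_dash, pvFoldA, pvFoldB, pvJoin_nil_flatten, List.nil_append]
  set aa := aln.toList with haa
  set dl := dna.toList with hdl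
  set lcore := pvLstripDash aa with hlc
  by_cases hnil : lcore = []
  · -- aln_aa_seq consists only of '-' characters
    have hall : ∀ c ∈ aa, c = '-' := by
      intro c hc
      have : aa.dropWhile (· == '-') = [] := hnil
      rw [List.dropWhile_eq_nil_iff] at this
      simpa using this c hc
    have hB : pvRstripDash aa = [] := pvRstrip_all_dash aa hall
    rw [hnil, hB]
    have hcoreA : pvRstripDash ([] : List Char) = [] := rfl
    rw [hcoreA]
    simp only [pvSplitD, List.map_cons, List.map_nil, pvFA, pvPB, List.flatten_nil,
      List.length_nil, Nat.zero_mul]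
    have : pvRstripDash (pvDashes (aa.length - 0) ++
        (List.take 0 (List.drop 0 dl) ++ ['-', '-', '-'] ++ [])) = [] := by
      apply pvRstrip_all_dash
      intro c hc
      simp only [List.take_zero, List.nil_append, List.mem_append] at hc
      rcases hc with hc | hc
      · exact pvDashes_all_dash _ c hc
      · simp at hc; exact hc
    rw [this]
    rfl
  · -- there is at least one amino acid
    obtain ⟨c0, t0, hct⟩ : ∃ c0 t0, lcore = c0 :: t0 := by
      cases h : lcore with
      | nil => exact absurd h hnil
      | cons a b => exact ⟨a, b, rfl⟩
    have hc0 : ¬ (c0 == '-') = true := by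
      have hdw : aa.dropWhile (· == '-') = c0 :: t0 := by rw [← hct]; rfl
      have := List.head?_dropWhile_not (p := (· == '-')) (l := aa)
      rw [hdw] at this
      simpa using this
    have hndrop : lcore.reverse.dropWhile (· == '-') ≠ [] := by
      intro hdw
      rw [List.dropWhile_eq_nil_iff] at hdw
      have : c0 ∈ lcore.reverse := by simp [hct]
      exact hc0 (hdw c0 this)
    set k := aa.length - lcore.length with hk
    have hdec : aa = List.replicate k '-' ++ lcore := pvLstrip_decomp aa
    have hBcore : pvRstripDash aa = List.replicate k '-' ++ pvRstripDash lcore := by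
      conv_lhs => rw [hdec]
      exact pvRstrip_append _ _ hndrop
    rw [hBcore, pvPB_dash_prefix, List.flatten_append, pvMain]
    have hflat : (List.replicate k (['-', '-', '-'] : List Char)).flatten = pvDashes k := rfl
    rw [hflat]
    congr 2
    rw [← List.append_assoc]
    exact pvRstrip_append_dash3 (pvDashes k ++ (pvPB dl 0 (pvRstripDash lcore)).flatten)
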